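-- pv_equiv track=rewrite | github.com/sseongsukim/CodingTest | programmers/level2/20.py | solution
-- ===== SOURCE A (Python) =====
-- from collections import Counter
--
-- def solution(want, number, discount):
--     answer = 0
--     want_dict = {}
--     for w, n in zip(want, number):
--         want_dict[w] = n
--
--     for i in range(len(discount) - 9):
--         discount_dict = Counter(discount[i: i + 10])
--         if discount_dict == want_dict:
--             answer += 1
--
--     return answer
-- ===== SOURCE B (Python) =====
-- from collections import Counter
--
-- def solution(want, number, discount):
--     want_dict = {}
--     for w, n in zip(want, number):
--         want_dict[w] = n
--
--     if len(discount) < 10: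
--         return 0
--
--     cnt = Counter(discount[:10])
--     answer = 1 if cnt == want_dict else 0
--     for out, inc in zip(discount, discount[10:]):
--         if cnt[out] == 1:
--             del cnt[out]
--         else:
--             cnt[out] -= 1
--         cnt[inc] += 1
--         if cnt == want_dict:
--             answer += 1
--     return answer
-- ===== Notes on version B (the rewrite author's own statement) =====
-- stated objective: faster
-- what changed: A rebuilds a Counter of discount[i:i+10] from scratch for every window; B builds one Counter for the first 10-element window and slides it across discount in a single incremental pass (decrement the leaving element, deleting keys that reach 0, increment the entering one), comparing the rolling counter to want_dict at each step.
import Mathlib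
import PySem

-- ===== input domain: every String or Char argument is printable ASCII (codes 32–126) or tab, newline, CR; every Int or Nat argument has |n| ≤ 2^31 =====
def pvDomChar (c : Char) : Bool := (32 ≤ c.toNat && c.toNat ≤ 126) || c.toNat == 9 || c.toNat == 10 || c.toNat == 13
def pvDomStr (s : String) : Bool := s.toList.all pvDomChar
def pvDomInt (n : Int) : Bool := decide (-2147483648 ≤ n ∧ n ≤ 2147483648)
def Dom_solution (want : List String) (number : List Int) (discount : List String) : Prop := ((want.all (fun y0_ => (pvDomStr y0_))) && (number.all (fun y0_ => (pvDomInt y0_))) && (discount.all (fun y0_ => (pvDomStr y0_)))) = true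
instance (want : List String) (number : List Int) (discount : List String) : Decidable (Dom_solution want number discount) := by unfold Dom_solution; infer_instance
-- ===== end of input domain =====

-- B replaces A's per-window Counter rebuild with ONE rolling counter slid across
-- discount (decrement the leaving element, increment the entering one); same return
-- value on every input, no side effects. Objective: a single incremental pass.

-- Python '==' between a Counter and a plain dict falls back to dict equality:
-- same key set and same values, order-insensitive. Both Pythons perform this test.
def pyDictEq (d1 d2 : PySem.Dict String Int) : Bool :=
  (d1.keys ++ d2.keys).all (fun k => d1.get? k == d2.get? k)

-- the last-write-wins dict built from 'for w, n in zip(want, number)' (identical loop in both Pythons)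
def buildWant (pairs : List (String × Int)) : PySem.Dict String Int :=
  pairs.foldl (fun d p => d.insert p.1 p.2) PySem.Dict.empty

-- ===== PORT A =====
def solution (want : List String) (number : List Int) (discount : List String) : Int :=
  let want_dict := buildWant (want.zip number)
  (PySem.List.pyRange 0 ((discount.length : Int) - 9) 1).foldl
    (fun answer i =>
      let discount_dict := PySem.Dict.counter (PySem.List.slice discount (some i) (some (i + 10)))
      if pyDictEq discount_dict want_dict then answer + 1 else answer)
    0

-- ===== PORT B =====
-- if cnt[out] == 1: del cnt[out]  else: cnt[out] -= 1
def decKey (cnt : PySem.Dict String Int) (o : String) : PySem.Dict String Int :=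
  if cnt.getD o 0 == 1 then cnt.erase o else cnt.insert o (cnt.getD o 0 - 1)

-- cnt[inc] += 1
def incKey (cnt : PySem.Dict String Int) (i : String) : PySem.Dict String Int :=
  cnt.insert i (cnt.getD i 0 + 1)

-- for out, inc in zip(discount, discount[10:]): slide the window, tally matches
def slideLoop (wd : PySem.Dict String Int) :
    List (String × String) → PySem.Dict String Int → Int → Int
  | [], _, answer => answer
  | (o, i) :: rest, cnt, answer =>
    let cnt' := incKey (decKey cnt o) i
    slideLoop wd rest cnt' (if pyDictEq cnt' wd then answer + 1 else answer)

def solution_alt (want : List String) (number : List Int) (discount : List String) : Int :=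
  let want_dict := buildWant (want.zip number)
  if discount.length < 10 then 0
  else
    let cnt0 := PySem.Dict.counter (PySem.List.slice discount none (some 10))
    let a0 : Int := if pyDictEq cnt0 want_dict then 1 else 0
    slideLoop want_dict (discount.zip (PySem.List.slice discount (some 10) none)) cnt0 a0

-- ===== PRECONDITION & SPEC =====
def Spec_solution (want : List String) (number : List Int) (discount : List String) (out : Int) : Prop := out = solution_alt want number discount
instance (want : List String) (number : List Int) (discount : List String) (out : Int) : Decidable (Spec_solution want number discount out) := by unfold Spec_solution; infer_instance

-- ===== CLAIM (what is proved, stated in full; the proofs are below) =====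
def Claim_equal_solution : Prop := ∀ (want : List String) (number : List Int) (discount : List String), Dom_solution want number discount → Spec_solution want number discount (solution want number discount)

-- ===== LEMMAS AND PROOFS =====

-- the value a Counter built from a window stores for a key counted n times (absent iff n = 0)
def optOf (n : Nat) : Option Int := if n = 0 then none else some (n : Int)

theorem optOf_getD (n : Nat) : (optOf n).getD 0 = (n : Int) := by
  unfold optOf; split <;> simp_all

theorem counter_get? (xs : List String) (k : String) :
    (PySem.Dict.counter xs).get? k = optOf (xs.count k) := by
  unfold optOf
  by_cases h : k ∈ xs
  · have hc : xs.count k ≠ 0 := by simpa [List.count_eq_zero] using h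
    have hk : k ∈ (PySem.Dict.counter xs).keys := by
      simp [PySem.Dict.keys_counter, PySem.Set.mem_ofList, h]
    cases hg : (PySem.Dict.counter xs).get? k with
    | none => exact absurd hk ((PySem.Dict.get?_eq_none_iff_not_mem_keys _ _).mp hg)
    | some v =>
      have := PySem.Dict.getD_counter xs k
      rw [PySem.Dict.getD_eq_get?_getD, hg] at this
      simp at this
      simp [hc, this]
  · have hc : xs.count k = 0 := by simpa [List.count_eq_zero] using h
    have : (PySem.Dict.counter xs).get? k = none := by
      rw [PySem.Dict.get?_eq_none_iff_not_mem_keys]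
      simp [PySem.Dict.keys_counter, PySem.Set.mem_ofList, h]
    simp [this, hc]

theorem find_filter_none (l : List (String × Int)) (k : String) :
    List.find? (fun p => p.1 == k) (l.filter (fun p => !(p.1 == k))) = none := by
  rw [List.find?_eq_none]
  intro a ha
  have := (List.mem_filter.mp ha).2
  simpa using this

theorem find_filter_ne (l : List (String × Int)) (k x : String) (hx : x ≠ k) :
    List.find? (fun p => p.1 == x) (l.filter (fun p => !(p.1 == k)))
      = List.find? (fun p => p.1 == x) l := by
  induction l with
  | nil => simp
  | cons p rest ih =>
    by_cases hp : p.1 = k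
    · have hpx : p.1 ≠ x := by rw [hp]; exact fun e => hx e.symm
      simp [hp, ih, Ne.symm hx]
    · by_cases hpx : p.1 = x <;> simp [hp, hpx, ih, hx]

-- 'del cnt[k]' seen through lookups (PySem ships no erase lemmas, so this one is ours)
theorem get?_erase (d : PySem.Dict String Int) (k x : String) :
    (d.erase k).get? x = if x = k then none else d.get? x := by
  by_cases hx : x = k
  · subst hx
    simp only [PySem.Dict.erase, PySem.Dict.get?]
    rw [find_filter_none]
    simp
  · simp only [PySem.Dict.erase, PySem.Dict.get?]
    rw [find_filter_ne d.items k x hx]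
    simp [hx]

theorem pyDictEq_iff (d1 d2 : PySem.Dict String Int) :
    pyDictEq d1 d2 = true ↔ ∀ k, d1.get? k = d2.get? k := by
  unfold pyDictEq
  rw [List.all_eq_true]
  constructor
  · intro h k
    by_cases h1 : k ∈ d1.keys
    · simpa using h k (by simp [h1])
    · by_cases h2 : k ∈ d2.keys
      · simpa using h k (by simp [h2])
      · rw [(PySem.Dict.get?_eq_none_iff_not_mem_keys d1 k).mpr h1,
            (PySem.Dict.get?_eq_none_iff_not_mem_keys d2 k).mpr h2]
  · intro h k _
    simp [h k]

theorem pyDictEq_congr (d1 d1' d2 : PySem.Dict String Int)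
    (h : ∀ k, d1.get? k = d1'.get? k) : pyDictEq d1 d2 = pyDictEq d1' d2 := by
  by_cases h1 : pyDictEq d1 d2 = true
  · have := (pyDictEq_iff d1 d2).mp h1
    have h2 : pyDictEq d1' d2 = true := (pyDictEq_iff d1' d2).mpr (fun k => (h k).symm.trans (this k))
    rw [h1, h2]
  · have h2 : ¬ pyDictEq d1' d2 = true := fun hc => h1 ((pyDictEq_iff d1 d2).mpr
      (fun k => (h k).trans ((pyDictEq_iff d1' d2).mp hc k)))
    simp only [Bool.not_eq_true] at h1 h2
    rw [h1, h2]

theorem decKey_count (cnt : PySem.Dict String Int) (x : String) (w : List String)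
    (h : ∀ j, cnt.get? j = optOf ((x :: w).count j)) :
    ∀ j, (decKey cnt x).get? j = optOf (w.count j) := by
  have hgx : cnt.getD x 0 = (w.count x : Int) + 1 := by
    rw [PySem.Dict.getD_eq_get?_getD, h x, optOf_getD, List.count_cons_self]
    push_cast; ring
  intro j
  unfold decKey
  by_cases hc : w.count x = 0
  · have hb : (cnt.getD x 0 == 1) = true := by rw [hgx, hc]; simp
    rw [hb, if_pos rfl, get?_erase]
    by_cases hj : j = x
    · subst hj; simp [optOf, hc]
    · have hxj : x ≠ j := fun e => hj e.symm
      rw [if_neg hj, h j]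
      simp [hxj]
  · have hb : (cnt.getD x 0 == 1) = false := by rw [hgx]; simp; omega
    rw [hb]
    simp only [Bool.false_eq_true, if_false]
    by_cases hj : j = x
    · subst hj
      rw [PySem.Dict.get?_insert_self, hgx]
      simp [optOf, hc]
    · have hxj : x ≠ j := fun e => hj e.symm
      rw [PySem.Dict.get?_insert_of_ne _ _ hj, h j]
      simp [hxj]

theorem incKey_count (cnt : PySem.Dict String Int) (y : String) (w : List String)
    (h : ∀ j, cnt.get? j = optOf (w.count j)) :
    ∀ j, (incKey cnt y).get? j = optOf ((w ++ [y]).count j) := by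
  intro j
  unfold incKey
  by_cases hj : j = y
  · subst hj
    rw [PySem.Dict.get?_insert_self, PySem.Dict.getD_eq_get?_getD, h j, optOf_getD]
    simp [optOf, List.count_append]
  · have hyj : y ≠ j := fun e => hj e.symm
    rw [PySem.Dict.get?_insert_of_ne _ _ hj, h j, List.count_append]
    simp [hyj]

theorem countP_range_succ (n : Nat) (p : Nat → Bool) :
    (List.range (n + 1)).countP p
      = (if p 0 then 1 else 0) + (List.range n).countP (fun j => p (j + 1)) := by
  rw [List.range_succ_eq_map]
  simp [List.countP_cons, List.countP_map, Function.comp_def, Nat.succ_eq_add_one]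
  split <;> omega

-- the rolling counter visits windows 1, 2, … in order; its tally counts their matches
theorem slide_eq (wd : PySem.Dict String Int) (xs : List String) :
    ∀ (cnt : PySem.Dict String Int) (ans : Int),
    10 ≤ xs.length →
    (∀ j, cnt.get? j = optOf ((xs.take 10).count j)) →
    slideLoop wd (xs.zip (xs.drop 10)) cnt ans
      = ans + ((List.range (xs.length - 10)).countP
          (fun j => pyDictEq (PySem.Dict.counter ((xs.drop (j + 1)).take 10)) wd) : Int) := by
  induction xs with
  | nil => intro cnt ans hlen _; simp at hlen
  | cons x t ih =>
    intro cnt ans hlen hinv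
    by_cases ht : t.length < 10
    · have hd : (x :: t).drop 10 = [] := by
        apply List.drop_eq_nil_of_le; simp; omega
      have hr : (x :: t).length - 10 = 0 := by simp; omega
      rw [hd, List.zip_nil_right, hr]
      simp [slideLoop]
    · have h9 : 9 < t.length := by omega
      have hd9 : t.drop 9 = t[9] :: t.drop 10 := List.drop_eq_getElem_cons h9
      have hdrop : (x :: t).drop 10 = t.drop 9 := rfl
      have hzip : (x :: t).zip ((x :: t).drop 10) = (x, t[9]) :: t.zip (t.drop 10) := by
        rw [hdrop, hd9, List.zip_cons_cons]
      have htake : (x :: t).take 10 = x :: t.take 9 := rfl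
      have hinv1 : ∀ j, (decKey cnt x).get? j = optOf ((t.take 9).count j) := by
        apply decKey_count
        intro j; rw [hinv j, htake]
      have htake10 : t.take 9 ++ [t[9]] = t.take 10 := by
        conv_rhs => rw [show (10:Nat) = 9 + 1 from rfl, List.take_add_one]
        simp [List.getElem?_eq_getElem h9]
      have hinv2 : ∀ j, (incKey (decKey cnt x) t[9]).get? j = optOf ((t.take 10).count j) := by
        intro j
        rw [incKey_count _ _ _ hinv1 j, htake10]
      rw [hzip]
      simp only [slideLoop]
      rw [ih _ _ (by omega) hinv2]
      have hb : pyDictEq (incKey (decKey cnt x) t[9]) wd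
          = pyDictEq (PySem.Dict.counter (t.take 10)) wd := by
        apply pyDictEq_congr
        intro k; rw [hinv2 k, counter_get?]
      have hlen' : (x :: t).length - 10 = (t.length - 10) + 1 := by simp; omega
      rw [hlen', countP_range_succ]
      simp only [List.drop_succ_cons, List.drop_zero]
      rw [hb]
      push_cast [apply_ite]
      split <;> ring

theorem solution_eq (want : List String) (number : List Int) (discount : List String) :
    solution want number discount = solution_alt want number discount := by
  unfold solution solution_alt
  set wd := buildWant (want.zip number) with hw
  by_cases hlen : discount.length < 10
  · rw [if_pos hlen]
    have h0 : PySem.List.pyRange 0 ((discount.length : Int) - 9) 1 = [] :=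
      PySem.List.pyRange_one_eq_nil (by omega)
    rw [h0]
    rfl
  · rw [if_neg hlen]
    have hL : 10 ≤ discount.length := by omega
    -- A's loop as a count over nat indices of drop/take windows
    rw [PySem.List.pyRange_one, List.foldl_map, PySem.List.foldl_count_if]
    have h10 : ∀ k : Nat, PySem.List.slice discount (some ((0:Int) + (k : Int)))
        (some ((0:Int) + (k : Int) + 10)) = (discount.drop k).take 10 := by
      intro k
      have h := PySem.List.slice_natCast_add discount k 10
      norm_num at h
      simpa using h
    simp only [h10]
    have hn : ((discount.length : Int) - 9 - 0).toNat = discount.length - 10 + 1 := by omega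
    rw [hn, countP_range_succ]
    -- B's slices
    have hs1 : PySem.List.slice discount none (some 10) = discount.take 10 := by
      have := PySem.List.slice_to discount (by norm_num : (0:Int) ≤ 10)
      simpa using this
    have hs2 : PySem.List.slice discount (some 10) none = discount.drop 10 := by
      have := PySem.List.slice_from discount (by norm_num : (0:Int) ≤ 10)
      simpa using this
    show _ = slideLoop wd (discount.zip (PySem.List.slice discount (some 10) none))
        (PySem.Dict.counter (PySem.List.slice discount none (some 10)))
        (if pyDictEq (PySem.Dict.counter (PySem.List.slice discount none (some 10))) wd then 1 else 0)
    rw [hs1, hs2, slide_eq wd discount _ _ hL (fun j => counter_get? (discount.take 10) j)]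
    simp only [List.drop_zero]
    push_cast [apply_ite]
    split <;> ring

-- ===== VERDICT (by name: the statement is the Claim_ definition above) =====
theorem solution_spec : Claim_equal_solution := by
  intro want number discount _
  unfold Spec_solution
  exact solution_eq want number discount
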